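-- pv_equiv track=rewrite | github.com/mindspore-lab/mindnlp | mindtorch/ops/array.py | infer_size_impl
-- ===== SOURCE A (Python) =====
-- def infer_size_impl(a, b):
--     lenA = len(a)
--     lenB = len(b)
--     ndim = max(lenA, lenB)
--     expanded_sizes = [0] * ndim
--
--     for i in range(ndim - 1, -1, -1):
--         offset = ndim - 1 - i
--         dimA = lenA - 1 - offset
--         dimB = lenB - 1 - offset
--
--         sizeA = a[dimA] if dimA >= 0 else 1
--         sizeB = b[dimB] if dimB >= 0 else 1
--
--         # 检查维度兼容性
--         if not (sizeA == sizeB or sizeA == 1 or sizeB == 1):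
--             raise RuntimeError(
--                 f"The size of tensor a ({sizeA}) must match the size of tensor b ({sizeB}) "
--                 f"at non-singleton dimension {i}"
--             )
--
--         # 应用广播规则：优先选择非1的维度大小
--         expanded_sizes[i] = sizeB if sizeA == 1 else sizeA
--
--     return expanded_sizes
-- ===== SOURCE B (Python) =====
-- def infer_size_impl(a, b):
--     # Pad the shorter shape with leading 1s, then combine front-to-back in one zip.
--     la, lb = len(a), len(b)
--     if la < lb:
--         a = [1] * (lb - la) + a
--     else:
--         b = [1] * (la - lb) + b
--     out = []
--     for x, y in zip(a, b):
--         if x != 1 and y != 1 and x != y: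
--             raise RuntimeError(
--                 f"The size of tensor a ({x}) must match the size of tensor b ({y}) "
--                 f"at non-singleton dimension {len(out)}"
--             )
--         out.append(x if x != 1 else y)
--     return out
-- ===== Notes on version B (the rewrite author's own statement) =====
-- stated objective: idiomatic
-- what changed: B pads the shorter shape with leading 1s and combines the two aligned shapes front-to-back in a single zip pass, replacing A's backwards index loop with its offset/dimA/dimB arithmetic and per-index writes into a preallocated [0]*ndim list.
-- outside the precondition, e.g. on infer_size_impl([2], [3]): A raises RuntimeError, B raises RuntimeError
import Mathlib
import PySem

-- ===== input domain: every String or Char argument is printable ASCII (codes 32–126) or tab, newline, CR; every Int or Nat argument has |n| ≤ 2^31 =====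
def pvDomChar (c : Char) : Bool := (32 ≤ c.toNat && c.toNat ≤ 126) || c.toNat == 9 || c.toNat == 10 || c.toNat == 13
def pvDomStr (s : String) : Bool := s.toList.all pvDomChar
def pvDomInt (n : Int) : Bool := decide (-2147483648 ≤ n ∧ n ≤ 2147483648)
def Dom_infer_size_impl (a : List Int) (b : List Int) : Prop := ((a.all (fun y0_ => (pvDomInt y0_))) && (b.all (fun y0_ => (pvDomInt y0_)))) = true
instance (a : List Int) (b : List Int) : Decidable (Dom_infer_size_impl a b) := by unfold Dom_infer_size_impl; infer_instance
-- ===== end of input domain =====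

-- B pads the shorter shape with leading 1s and combines the aligned shapes in one
-- forward zip pass (idiomatic), instead of A's backwards index loop with offset
-- arithmetic writing into a preallocated list. Equivalence is about the return
-- value; where A raises RuntimeError (incompatible sizes) Pre_ excludes the input.

-- ===== PORT A =====
def infer_size_impl (a : List Int) (b : List Int) : List Int :=
  let lenA : Int := a.length
  let lenB : Int := b.length
  let ndim : Int := max lenA lenB
  let expanded : List Int := List.replicate ndim.toNat 0
  -- the incompatibility branch raises in Python; those inputs are outside Pre_
  (PySem.List.pyRange (ndim - 1) (-1) (-1)).foldl (fun es i =>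
    let offset := ndim - 1 - i
    let dimA := lenA - 1 - offset
    let dimB := lenB - 1 - offset
    let sizeA := if 0 ≤ dimA then PySem.List.pyGetD a dimA 0 else 1
    let sizeB := if 0 ≤ dimB then PySem.List.pyGetD b dimB 0 else 1
    es.set i.toNat (if sizeA = 1 then sizeB else sizeA)) expanded

-- ===== PORT B =====
def infer_size_impl_alt (a : List Int) (b : List Int) : List Int :=
  let la := a.length
  let lb := b.length
  let a' := if la < lb then List.replicate (lb - la) 1 ++ a else a
  let b' := if la < lb then b else List.replicate (la - lb) 1 ++ b
  (a'.zip b').foldl (fun out p => out ++ [if p.1 ≠ 1 then p.1 else p.2]) []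

-- ===== PRECONDITION & SPEC =====
-- Pre_ excludes exactly the inputs on which Python A raises RuntimeError:
-- a pair of right-aligned sizes that are different and neither equal to 1.
def Pre_infer_size_impl (a : List Int) (b : List Int) : Prop :=
  ∀ k, k < max a.length b.length →
    (a.reverse.getD k 1 = b.reverse.getD k 1 ∨ a.reverse.getD k 1 = 1 ∨ b.reverse.getD k 1 = 1)
instance (a : List Int) (b : List Int) : Decidable (Pre_infer_size_impl a b) := by
  unfold Pre_infer_size_impl; infer_instance
def pvWitness_infer_size_impl : List Int × List Int := ([2, 1], [3])

def Spec_infer_size_impl (a : List Int) (b : List Int) (out : List Int) : Prop := out = infer_size_impl_alt a b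
instance (a : List Int) (b : List Int) (out : List Int) : Decidable (Spec_infer_size_impl a b out) := by unfold Spec_infer_size_impl; infer_instance

-- ===== CLAIM (what is proved, stated in full; the proofs are below) =====
def Claim_equal_infer_size_impl : Prop := ∀ (a : List Int) (b : List Int), Dom_infer_size_impl a b → Pre_infer_size_impl a b → Spec_infer_size_impl a b (infer_size_impl a b)

-- ===== LEMMAS AND PROOFS =====

-- the per-index value both programs compute, at front index j (j < N, N = max len)
def pvElem (a b : List Int) (j : Nat) : Int :=
  if (if max a.length b.length - a.length ≤ j then a.getD (j - (max a.length b.length - a.length)) 0 else 1) = 1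
  then (if max a.length b.length - b.length ≤ j then b.getD (j - (max a.length b.length - b.length)) 0 else 1)
  else (if max a.length b.length - a.length ≤ j then a.getD (j - (max a.length b.length - a.length)) 0 else 1)

lemma foldl_set_range (F : Nat → Int) (N : Nat) :
    ∀ n, n ≤ N → ∀ init : List Int, init.length = N →
      (((List.range n).foldl (fun es k => es.set (N - 1 - k) (F (N - 1 - k))) init).length = N ∧
       ∀ j, j < N →
         ((List.range n).foldl (fun es k => es.set (N - 1 - k) (F (N - 1 - k))) init).getD j 0 =
           if N - n ≤ j then F j else init.getD j 0) := by
  intro n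
  induction n with
  | zero =>
      intro _ init hlen
      refine ⟨by simpa using hlen, ?_⟩
      intro j hj
      have h : ¬ (N - 0 ≤ j) := by omega
      simp only [List.range_zero, List.foldl_nil, if_neg h]
  | succ n ih =>
      intro hn init hlen
      have hn' : n ≤ N := by omega
      obtain ⟨ihlen, ihget⟩ := ih hn' init hlen
      rw [List.range_succ, List.foldl_append]
      set L := (List.range n).foldl (fun es k => es.set (N - 1 - k) (F (N - 1 - k))) init with hL
      refine ⟨by simp [ihlen], ?_⟩
      intro j hj
      simp only [List.foldl_cons, List.foldl_nil]
      have hm : N - 1 - n < L.length := by omega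
      have hjL : j < L.length := by omega
      rw [List.getD_eq_getElem _ _ (by simpa using hjL), List.getElem_set]
      by_cases hje : N - 1 - n = j
      · have : N - (n + 1) ≤ j := by omega
        simp [hje, this]
      · simp only [if_neg hje]
        rw [← List.getD_eq_getElem L _ hjL, ihget j hj]
        have : (N - n ≤ j) ↔ (N - (n + 1) ≤ j) := by omega
        by_cases h1 : N - n ≤ j
        · simp [h1, this.mp h1]
        · have h2 : ¬ (N - (n + 1) ≤ j) := by omega
          simp [h1, h2]

lemma foldl_append_map (g : Int × Int → Int) (l : List (Int × Int)) :
    ∀ acc : List Int, l.foldl (fun out p => out ++ [g p]) acc = acc ++ l.map g := by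
  induction l with
  | nil => intro acc; simp
  | cons p l ih => intro acc; simp [ih]

lemma infer_size_impl_eq (a b : List Int) :
    infer_size_impl a b =
      (List.range (max a.length b.length)).map (pvElem a b) := by
  unfold infer_size_impl
  set N : Nat := max a.length b.length with hN
  have hndim : max (a.length : Int) (b.length : Int) = (N : Int) := by push_cast [hN]; omega
  simp only [hndim, Int.toNat_natCast]
  rw [PySem.List.pyRange_neg_one, show ((N : Int) - 1 - (-1)).toNat = N from by omega,
    List.foldl_map]
  rw [PySem.List.foldl_congr_mem (List.range N) _
      (fun es k => es.set (N - 1 - k) (pvElem a b (N - 1 - k))) (List.replicate N 0)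
      (by
        intro es k hk
        have hkN : k < N := List.mem_range.mp hk
        have hja : (a.length : Int) - 1 - ((N : Int) - 1 - ((N : Int) - 1 - k)) = (a.length : Int) - N + (N - 1 - k) := by
          omega
        have hjb : (b.length : Int) - 1 - ((N : Int) - 1 - ((N : Int) - 1 - k)) = (b.length : Int) - N + (N - 1 - k) := by
          omega
        have hi : ((N : Int) - 1 - k).toNat = N - 1 - k := by omega
        simp only [hja, hjb, hi]
        congr 1
        have ha' : (if 0 ≤ (a.length : Int) - N + (N - 1 - k) then
            PySem.List.pyGetD a ((a.length : Int) - N + (N - 1 - k)) 0 else 1)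
            = (if N - a.length ≤ N - 1 - k then a.getD ((N - 1 - k) - (N - a.length)) 0 else 1) := by
          have hla : a.length ≤ N := by omega
          by_cases h : N - a.length ≤ N - 1 - k
          · have h0 : (0 : Int) ≤ (a.length : Int) - N + (N - 1 - k) := by omega
            have heq : (a.length : Int) - N + (N - 1 - k) = (((N - 1 - k) - (N - a.length) : Nat) : Int) := by
              push_cast
              omega
            rw [if_pos h0, if_pos h, heq, PySem.List.pyGetD_natCast]
          · have h0 : ¬ (0 : Int) ≤ (a.length : Int) - N + (N - 1 - k) := by omega
            rw [if_neg h0, if_neg h]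
        have hb' : (if 0 ≤ (b.length : Int) - N + (N - 1 - k) then
            PySem.List.pyGetD b ((b.length : Int) - N + (N - 1 - k)) 0 else 1)
            = (if N - b.length ≤ N - 1 - k then b.getD ((N - 1 - k) - (N - b.length)) 0 else 1) := by
          have hlb : b.length ≤ N := by omega
          by_cases h : N - b.length ≤ N - 1 - k
          · have h0 : (0 : Int) ≤ (b.length : Int) - N + (N - 1 - k) := by omega
            have heq : (b.length : Int) - N + (N - 1 - k) = (((N - 1 - k) - (N - b.length) : Nat) : Int) := by
              omega
            rw [if_pos h0, if_pos h, heq, PySem.List.pyGetD_natCast]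
          · have h0 : ¬ (0 : Int) ≤ (b.length : Int) - N + (N - 1 - k) := by omega
            rw [if_neg h0, if_neg h]
        rw [ha', hb']
        rfl)]
  obtain ⟨hlen, hget⟩ := foldl_set_range (pvElem a b) N N le_rfl (List.replicate N 0) (by simp)
  apply List.ext_getElem
  · simp [hlen]
  · intro j h1 h2
    have hjN : j < N := by simpa using h2
    have hgj := hget j hjN
    rw [List.getD_eq_getElem _ _ h1, if_pos (by omega)] at hgj
    simp only [List.getElem_map, List.getElem_range]
    exact hgj

lemma infer_size_impl_alt_eq (a b : List Int) :
    infer_size_impl_alt a b =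
      (List.range (max a.length b.length)).map (pvElem a b) := by
  unfold infer_size_impl_alt
  simp only []
  set N : Nat := max a.length b.length with hN
  set a' := if a.length < b.length then List.replicate (b.length - a.length) 1 ++ a else a with ha'
  set b' := if a.length < b.length then b else List.replicate (a.length - b.length) 1 ++ b with hb'
  have hla : a'.length = N := by
    by_cases h : a.length < b.length <;> simp [ha', h, hN] <;> omega
  have hlb : b'.length = N := by
    by_cases h : a.length < b.length <;> simp [hb', h, hN] <;> omega
  rw [foldl_append_map]
  have hgetA : ∀ j, j < N → a'.getD j 0 = (if N - a.length ≤ j then a.getD (j - (N - a.length)) 0 else 1) := by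
    intro j hj
    by_cases h : a.length < b.length
    · have hNb : N = b.length := by omega
      simp only [ha', if_pos h]
      by_cases h2 : N - a.length ≤ j
      · rw [if_pos h2, hNb]
        have hj1 : j < (List.replicate (b.length - a.length) (1:Int) ++ a).length := by
          simp; omega
        have hj2 : j - (b.length - a.length) < a.length := by omega
        rw [List.getD_eq_getElem _ _ hj1, List.getD_eq_getElem _ _ hj2,
          List.getElem_append_right (by simp; omega)]
        simp
      · rw [if_neg h2]
        have hj1 : j < (List.replicate (b.length - a.length) (1:Int) ++ a).length := by
          simp; omega
        rw [List.getD_eq_getElem _ _ hj1, List.getElem_append_left (by simp; omega)]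
        simp
    · have hNa : N = a.length := by omega
      have h2 : N - a.length ≤ j := by omega
      simp only [ha', if_neg h]
      rw [if_pos h2]
      congr 1; omega
  have hgetB : ∀ j, j < N → b'.getD j 0 = (if N - b.length ≤ j then b.getD (j - (N - b.length)) 0 else 1) := by
    intro j hj
    by_cases h : a.length < b.length
    · have hNb : N = b.length := by omega
      have h2 : N - b.length ≤ j := by omega
      simp only [hb', if_pos h]
      rw [if_pos h2]
      congr 1; omega
    · have hNa : N = a.length := by omega
      simp only [hb', if_neg h]
      by_cases h2 : N - b.length ≤ j
      · rw [if_pos h2, hNa]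
        have hj1 : j < (List.replicate (a.length - b.length) (1:Int) ++ b).length := by
          simp; omega
        have hj2 : j - (a.length - b.length) < b.length := by omega
        rw [List.getD_eq_getElem _ _ hj1, List.getD_eq_getElem _ _ hj2,
          List.getElem_append_right (by simp; omega)]
        simp
      · rw [if_neg h2]
        have hj1 : j < (List.replicate (a.length - b.length) (1:Int) ++ b).length := by
          simp; omega
        rw [List.getD_eq_getElem _ _ hj1, List.getElem_append_left (by simp; omega)]
        simp
  apply List.ext_getElem
  · simp [List.length_zip, hla, hlb]
  · intro j h1 h2
    have hjN : j < N := by simpa using h2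
    have hja : j < a'.length := by omega
    have hjb : j < b'.length := by omega
    simp only [List.nil_append, List.getElem_map, List.getElem_zip, List.getElem_range]
    have e1 : a'[j] = (if N - a.length ≤ j then a.getD (j - (N - a.length)) 0 else 1) :=
      (List.getD_eq_getElem a' 0 hja).symm.trans (hgetA j hjN)
    have e2 : b'[j] = (if N - b.length ≤ j then b.getD (j - (N - b.length)) 0 else 1) :=
      (List.getD_eq_getElem b' 0 hjb).symm.trans (hgetB j hjN)
    rw [e1, e2]
    simp only [pvElem, ← hN]
    by_cases hx : (if N - a.length ≤ j then a.getD (j - (N - a.length)) 0 else 1) = 1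
    · rw [if_neg (not_not_intro hx), if_pos hx]
    · rw [if_pos hx, if_neg hx]

-- ===== VERDICT (by name: the statement is the Claim_ definition above) =====
theorem infer_size_impl_spec : Claim_equal_infer_size_impl := by
  intro a b _ _
  unfold Spec_infer_size_impl
  rw [infer_size_impl_eq, infer_size_impl_alt_eq]
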